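-- pv_equiv track=rewrite | github.com/sphill9803/PSLog | Week1/Day1/bj1316.py | isGroup
-- ===== SOURCE A (Python) =====
-- def isGroup(word):
--     alpha_set = set()
--     curr_char = word[0]
--     alpha_set.add(curr_char)
--     for c in word:
--         if c != curr_char and c in alpha_set:
--             return False
--         alpha_set.add(c)
--         curr_char = c
--     return True
-- ===== SOURCE B (Python) =====
-- def isGroup(word):
--     # Collapse the word into its run keys, then a word is a "group word"
--     # iff no run key repeats.
--     keys = []
--     for c in word:
--         if not keys or keys[-1] != c:
--             keys.append(c)
--     return len(keys) == len(set(keys))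
-- ===== Notes on version B (the rewrite author's own statement) =====
-- stated objective: simpler
-- what changed: B first collapses the word into its list of run keys and then checks that no key repeats (len(keys)==len(set(keys))), replacing A's interleaved per-character seen-set tracking with current-character state and early return.
import Mathlib
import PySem

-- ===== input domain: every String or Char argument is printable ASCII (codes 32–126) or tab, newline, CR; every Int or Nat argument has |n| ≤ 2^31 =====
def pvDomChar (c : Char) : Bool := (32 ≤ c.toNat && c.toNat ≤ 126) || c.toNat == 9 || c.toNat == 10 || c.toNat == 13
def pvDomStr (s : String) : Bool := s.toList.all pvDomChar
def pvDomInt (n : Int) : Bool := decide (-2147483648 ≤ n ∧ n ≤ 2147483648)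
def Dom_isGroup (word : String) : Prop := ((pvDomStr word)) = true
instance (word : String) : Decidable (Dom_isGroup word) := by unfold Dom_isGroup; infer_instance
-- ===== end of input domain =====

-- B collapses the word into its list of run keys and checks that no key repeats,
-- replacing A's interleaved seen-set/current-character tracking; objective: simpler.


-- ===== PORT A =====
-- the for-loop of A: state = (alpha_set, curr_char)
def isGroupGo (cs : List Char) (s : PySem.Set Char) (curr : Char) : Bool :=
  match cs with
  | [] => true
  | c :: rest =>
    if c != curr && PySem.Set.contains s c then false
    else isGroupGo rest (PySem.Set.add s c) c

def isGroup (word : String) : Bool :=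
  match word.toList with
  | [] => false   -- word[0] raises IndexError here; excluded by Pre_isGroup
  | c :: rest => isGroupGo (c :: rest) (PySem.Set.add PySem.Set.empty c) c

-- ===== PORT B =====
def isGroup_alt (word : String) : Bool :=
  let keys := word.toList.foldl
    (fun keys c =>
      -- 'not keys or keys[-1] != c'; the pyGetD default is irrelevant: it is
      -- only reached when keys is empty, where the first disjunct already holds
      if keys.isEmpty || (PySem.List.pyGetD keys (-1) c != c) then keys ++ [c] else keys)
    []
  keys.length == (PySem.Set.ofList keys).length

-- ===== PRECONDITION & SPEC =====
-- Pre_ excludes only the empty string, on which A raises IndexError (word[0]).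
def Pre_isGroup (word : String) : Prop := word ≠ ""
instance (word : String) : Decidable (Pre_isGroup word) := by unfold Pre_isGroup; infer_instance
def pvWitness_isGroup : String := "aabb"

def Spec_isGroup (word : String) (out : Bool) : Prop := out = isGroup_alt word
instance (word : String) (out : Bool) : Decidable (Spec_isGroup word out) := by unfold Spec_isGroup; infer_instance

-- ===== CLAIM =====
def Claim_equal_isGroup : Prop := ∀ (word : String), Dom_isGroup word → Pre_isGroup word → Spec_isGroup word (isGroup word)

-- ===== LEMMAS AND PROOFS =====

-- the run keys of cs, given that the previous character was curr
def keysFrom (curr : Char) : List Char → List Char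
  | [] => []
  | c :: cs => if c = curr then keysFrom curr cs else c :: keysFrom c cs

-- B's loop body
def stepB (keys : List Char) (c : Char) : List Char :=
  if keys.isEmpty || (PySem.List.pyGetD keys (-1) c != c) then keys ++ [c] else keys

lemma isGroup_alt_eq_stepB (word : String) :
    isGroup_alt word =
      ((word.toList.foldl stepB []).length == (PySem.Set.ofList (word.toList.foldl stepB [])).length) := by
  rfl

lemma foldB (cs : List Char) : ∀ (ks : List Char) (curr : Char),
    cs.foldl stepB (ks ++ [curr]) = (ks ++ [curr]) ++ keysFrom curr cs := by
  induction cs with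
  | nil => intro ks curr; simp [keysFrom]
  | cons c rest ih =>
    intro ks curr
    by_cases h : c = curr
    · subst h
      simp [List.foldl_cons, stepB, keysFrom, ih ks c]
    · have hb : (curr != c) = true := by
        simp only [bne_iff_ne, ne_eq]; exact fun hh => h hh.symm
      have hstep : stepB (ks ++ [curr]) c = (ks ++ [curr]) ++ [c] := by
        simp [stepB, hb]
      rw [List.foldl_cons, hstep, ih (ks ++ [curr]) c]
      simp [keysFrom, h]

lemma goA_iff (cs : List Char) : ∀ (s : PySem.Set Char) (curr : Char), curr ∈ s →
    (isGroupGo cs s curr = true ↔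
      (keysFrom curr cs).Nodup ∧ ∀ k ∈ keysFrom curr cs, k ∉ s) := by
  induction cs with
  | nil => intro s curr _; simp [isGroupGo, keysFrom]
  | cons c rest ih =>
    intro s curr hcurr
    by_cases hc : c = curr
    · subst hc
      have hadd : PySem.Set.add s c = s := PySem.Set.add_of_mem hcurr
      simp only [isGroupGo, bne_self_eq_false, Bool.false_and, Bool.false_eq_true,
        if_false, hadd, keysFrom]
      exact ih s c hcurr
    · by_cases hmem : c ∈ s
      · have hcond : (c != curr && PySem.Set.contains s c) = true := by
          simp only [Bool.and_eq_true, bne_iff_ne, ne_eq]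
          exact ⟨hc, (PySem.Set.contains_iff s c).2 hmem⟩
        simp only [isGroupGo, hcond, if_true]
        constructor
        · intro h; exact absurd h (by simp)
        · rintro ⟨-, hall⟩
          exact absurd hmem (hall c (by simp [keysFrom, hc]))
      · have hcond : (c != curr && PySem.Set.contains s c) = false := by
          cases h' : PySem.Set.contains s c
          · simp
          · exact absurd ((PySem.Set.contains_iff s c).1 h') hmem
        have hmemadd : c ∈ PySem.Set.add s c := (PySem.Set.mem_add s c c).2 (Or.inr rfl)
        simp only [isGroupGo, hcond, Bool.false_eq_true, if_false]
        rw [ih (PySem.Set.add s c) c hmemadd]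
        simp only [keysFrom, if_neg hc, List.nodup_cons]
        constructor
        · rintro ⟨hnd, hall⟩
          refine ⟨⟨fun hcin => (hall c hcin) ((PySem.Set.mem_add s c c).2 (Or.inr rfl)), hnd⟩, ?_⟩
          intro k hkmem
          rcases List.mem_cons.1 hkmem with rfl | hk
          · exact hmem
          · exact fun hks => (hall k hk) ((PySem.Set.mem_add s c k).2 (Or.inl hks))
        · rintro ⟨⟨hcn, hnd⟩, hall⟩
          refine ⟨hnd, fun k hk hkadd => ?_⟩
          rcases (PySem.Set.mem_add s c k).1 hkadd with hks | rfl
          · exact hall k (List.mem_cons_of_mem c hk) hks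
          · exact hcn hk

lemma length_ofList_lt_of_not_nodup (l : List Char) (h : ¬ l.Nodup) :
    (PySem.Set.ofList l).length < l.length := by
  induction l with
  | nil => exact absurd List.nodup_nil h
  | cons x xs ih =>
    have hdisc : PySem.Set.discard (PySem.Set.ofList xs) x
        = (PySem.Set.ofList xs).filter (fun y => !(y == x)) := by
      simp [PySem.Set.discard]
    have hlc : (x :: xs).length = xs.length + 1 := rfl
    rw [PySem.Set.ofList_cons, List.length_cons, hdisc, hlc]
    by_cases hx : x ∈ xs
    · have h1 : ((PySem.Set.ofList xs).filter (fun y => !(y == x))).length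
          < (PySem.Set.ofList xs).length := by
        rw [List.length_filter_lt_length_iff_exists]
        exact ⟨x, (PySem.Set.mem_ofList xs x).2 hx, by simp⟩
      have h2 := PySem.Set.length_ofList_le xs
      omega
    · have hxs : ¬ xs.Nodup := fun hn => h (List.nodup_cons.2 ⟨hx, hn⟩)
      have h1 := List.length_filter_le (fun y => !(y == x)) (PySem.Set.ofList xs)
      have h2 := ih hxs
      omega

lemma beq_length_iff_nodup (l : List Char) :
    ((l.length == (PySem.Set.ofList l).length) = true) ↔ l.Nodup := by
  rw [beq_iff_eq]
  constructor
  · intro h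
    by_contra hn
    have := length_ofList_lt_of_not_nodup l hn
    omega
  · intro h
    rw [PySem.Set.ofList_eq_self_of_nodup l h]

-- ===== VERDICT (by name: the statement is the Claim_ definition above) =====
theorem isGroup_spec : Claim_equal_isGroup := by
  intro word _ hpre
  unfold Spec_isGroup
  obtain ⟨c, rest, hw⟩ : ∃ c rest, word.toList = c :: rest := by
    cases h : word.toList with
    | nil => exact absurd (String.toList_inj.mp (by simp [h])) hpre
    | cons c rest => exact ⟨c, rest, rfl⟩
  -- evaluate A's side
  have hA : isGroup word = isGroupGo rest [c] c := by
    have hadd : PySem.Set.add PySem.Set.empty c = [c] := rfl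
    have hcc : (c != c && PySem.Set.contains [c] c) = false := by simp
    have hac : PySem.Set.add ([c] : PySem.Set Char) c = [c] :=
      PySem.Set.add_of_mem (by simp)
    simp only [isGroup, hw, hadd, isGroupGo, hcc, Bool.false_eq_true, if_false, hac]
  -- evaluate B's side
  have hkeys : word.toList.foldl stepB [] = c :: keysFrom c rest := by
    have h0 : stepB [] c = [c] := by simp [stepB]
    have := foldB rest [] c
    simp only [List.nil_append] at this
    rw [hw, List.foldl_cons, h0, this]
    simp
  have hB : isGroup_alt word =
      (((c :: keysFrom c rest).length == (PySem.Set.ofList (c :: keysFrom c rest)).length)) := by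
    rw [isGroup_alt_eq_stepB, hkeys]
  rw [hA, hB]
  rw [Bool.eq_iff_iff]
  rw [goA_iff rest [c] c (by simp), beq_length_iff_nodup]
  simp only [List.nodup_cons, List.mem_singleton]
  constructor
  · rintro ⟨hnd, hall⟩
    exact ⟨fun hcin => hall c hcin rfl, hnd⟩
  · rintro ⟨hcn, hnd⟩
    exact ⟨hnd, fun k hk hkc => hcn (hkc ▸ hk)⟩
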